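-- pv_equiv track=rewrite | github.com/Shiyang0530/Hexagonal | inspection paradox  hexagon simulation.py | classify_colors
-- ===== SOURCE A (Python) =====
-- def classify_colors(points, edges, outer_ring, second_ring):
--     num_nodes = len(points)
--
--     adj = {i: set() for i in range(num_nodes)}
--     for u, v in edges:
--         adj[u].add(v)
--         adj[v].add(u)
--
--     degrees = {i: len(adj[i]) for i in range(num_nodes)}
--     colors = []
--
--     for i in range(num_nodes):
--         if i in outer_ring or i in second_ring:
--             colors.append("gray")
--             continue
--
--         deg_i = degrees[i]
--         neighbors = adj[i]
--
--         if deg_i == 0: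
--             colors.append("red")
--             continue
--
--         higher = sum(1 for j in neighbors if degrees[j] > deg_i)
--         lower = sum(1 for j in neighbors if degrees[j] < deg_i)
--
--         if higher > lower:
--             colors.append("red")
--         elif lower > higher:
--             colors.append("green")
--         else:
--             colors.append("yellow")
--
--     return colors, degrees
-- ===== SOURCE B (Python) =====
-- def classify_colors(points, edges, outer_ring, second_ring):
--     num_nodes = len(points)
--
--     adj = {i: set() for i in range(num_nodes)}
--     for u, v in edges:
--         adj[u].add(v)
--         adj[v].add(u)
--
--     degrees = {i: len(adj[i]) for i in range(num_nodes)}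
--
--     # one pass over the unique undirected edges instead of a per-node neighbor scan
--     higher = {i: 0 for i in range(num_nodes)}
--     lower = {i: 0 for i in range(num_nodes)}
--     for u in range(num_nodes):
--         for v in adj[u]:
--             if u < v:
--                 if degrees[u] < degrees[v]:
--                     higher[u] += 1
--                     lower[v] += 1
--                 elif degrees[v] < degrees[u]:
--                     lower[u] += 1
--                     higher[v] += 1
--
--     colors = []
--     for i in range(num_nodes):
--         if i in outer_ring or i in second_ring:
--             colors.append("gray")
--         elif degrees[i] == 0:
--             colors.append("red")
--         elif higher[i] > lower[i]:
--             colors.append("red")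
--         elif lower[i] > higher[i]:
--             colors.append("green")
--         else:
--             colors.append("yellow")
--
--     return colors, degrees
-- ===== Notes on version B (the rewrite author's own statement) =====
-- stated objective: alternative
-- what changed: A counts higher/lower-degree neighbors by scanning each node's full neighbor set (every undirected edge examined twice); B instead makes a single pass over the unique undirected edges (v > u), filling two counter dicts symmetrically, then classifies nodes from the counters.
import Mathlib
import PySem

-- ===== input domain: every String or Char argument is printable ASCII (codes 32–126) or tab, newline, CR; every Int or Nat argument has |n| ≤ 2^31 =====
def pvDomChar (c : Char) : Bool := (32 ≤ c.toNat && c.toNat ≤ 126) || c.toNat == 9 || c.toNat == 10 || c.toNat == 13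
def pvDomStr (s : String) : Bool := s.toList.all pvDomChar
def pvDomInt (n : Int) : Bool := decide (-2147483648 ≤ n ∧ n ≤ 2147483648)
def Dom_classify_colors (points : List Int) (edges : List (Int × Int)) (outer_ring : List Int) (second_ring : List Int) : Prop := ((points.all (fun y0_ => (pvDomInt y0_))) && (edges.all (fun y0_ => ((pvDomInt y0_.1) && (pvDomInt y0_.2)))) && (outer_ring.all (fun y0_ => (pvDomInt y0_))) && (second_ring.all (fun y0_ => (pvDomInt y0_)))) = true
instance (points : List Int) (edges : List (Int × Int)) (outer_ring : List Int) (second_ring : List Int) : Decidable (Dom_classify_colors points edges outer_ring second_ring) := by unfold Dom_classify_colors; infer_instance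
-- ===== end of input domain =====

-- B replaces A's per-node scan over all neighbor sets (each undirected edge examined twice) by a single
-- pass over the unique undirected edges that fills two counter dicts; same adjacency/degree construction.

-- ===== PORT A =====
-- Helpers shared by BOTH ports: Source A and Source B build the adjacency dict and the degrees dict with the
-- identical code, so both ports cite these same helpers.
-- `adj[u].add(v)` is a read-modify-store on an existing key (KeyError when the key is absent — those
-- inputs are excluded by Pre_); it is ported as insert of the updated set, exact whenever the key exists.
def pvInitAdj (n : Int) : PySem.Dict Int (PySem.Set Int) :=
  (PySem.List.pyRange 0 n 1).foldl (fun d i => d.insert i PySem.Set.empty) PySem.Dict.empty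

def pvAdjStep (d : PySem.Dict Int (PySem.Set Int)) (p : Int × Int) : PySem.Dict Int (PySem.Set Int) :=
  let d1 := d.insert p.1 (PySem.Set.add (d.getD p.1 PySem.Set.empty) p.2)
  d1.insert p.2 (PySem.Set.add (d1.getD p.2 PySem.Set.empty) p.1)

def pvBuildAdj (n : Int) (edges : List (Int × Int)) : PySem.Dict Int (PySem.Set Int) :=
  edges.foldl pvAdjStep (pvInitAdj n)

def pvDegrees (n : Int) (adj : PySem.Dict Int (PySem.Set Int)) : PySem.Dict Int Int :=
  (PySem.List.pyRange 0 n 1).foldl (fun d i => d.insert i (PySem.Set.len (adj.getD i PySem.Set.empty))) PySem.Dict.empty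

-- body of A's classification loop (`degrees[i]` / `degrees[j]` are present keys under Pre_, ported as getD)
def pvColorStepA (outer_ring second_ring : List Int) (adj : PySem.Dict Int (PySem.Set Int))
    (degrees : PySem.Dict Int Int) (cs : List String) (i : Int) : List String :=
  if outer_ring.contains i || second_ring.contains i then cs ++ ["gray"]
  else
    let deg_i := degrees.getD i 0
    let neighbors := adj.getD i PySem.Set.empty
    if deg_i == 0 then cs ++ ["red"]
    else
      let higher : Int := neighbors.foldl (fun acc j => if degrees.getD j 0 > deg_i then acc + 1 else acc) 0
      let lower : Int := neighbors.foldl (fun acc j => if degrees.getD j 0 < deg_i then acc + 1 else acc) 0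
      if higher > lower then cs ++ ["red"]
      else if lower > higher then cs ++ ["green"]
      else cs ++ ["yellow"]

def classify_colors (points : List Int) (edges : List (Int × Int)) (outer_ring : List Int) (second_ring : List Int) : List String × (List (Int × Int)) :=
  let num_nodes : Int := (points.length : Int)
  let adj := pvBuildAdj num_nodes edges
  let degrees := pvDegrees num_nodes adj
  let colors := (PySem.List.pyRange 0 num_nodes 1).foldl (pvColorStepA outer_ring second_ring adj degrees) []
  (colors, degrees.items)

-- ===== PORT B =====
def pvZeros (n : Int) : PySem.Dict Int Int :=
  (PySem.List.pyRange 0 n 1).foldl (fun d i => d.insert i (0 : Int)) PySem.Dict.empty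

-- body of B's single pass over the unique undirected edges (`higher[u] += 1` on a present key)
def pvHLStep (degrees : PySem.Dict Int Int) (u : Int)
    (hl : PySem.Dict Int Int × PySem.Dict Int Int) (v : Int) : PySem.Dict Int Int × PySem.Dict Int Int :=
  if u < v then
    if degrees.getD u 0 < degrees.getD v 0 then
      (hl.1.insert u (hl.1.getD u 0 + 1), hl.2.insert v (hl.2.getD v 0 + 1))
    else if degrees.getD v 0 < degrees.getD u 0 then
      (hl.1.insert v (hl.1.getD v 0 + 1), hl.2.insert u (hl.2.getD u 0 + 1))
    else hl
  else hl

def pvColorStepB (outer_ring second_ring : List Int) (degrees : PySem.Dict Int Int)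
    (hl : PySem.Dict Int Int × PySem.Dict Int Int) (cs : List String) (i : Int) : List String :=
  if outer_ring.contains i || second_ring.contains i then cs ++ ["gray"]
  else if degrees.getD i 0 == 0 then cs ++ ["red"]
  else if hl.1.getD i 0 > hl.2.getD i 0 then cs ++ ["red"]
  else if hl.2.getD i 0 > hl.1.getD i 0 then cs ++ ["green"]
  else cs ++ ["yellow"]

def classify_colors_alt (points : List Int) (edges : List (Int × Int)) (outer_ring : List Int) (second_ring : List Int) : List String × (List (Int × Int)) :=
  let num_nodes : Int := (points.length : Int)
  let adj := pvBuildAdj num_nodes edges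
  let degrees := pvDegrees num_nodes adj
  let hl := (PySem.List.pyRange 0 num_nodes 1).foldl
    (fun hl u => (adj.getD u PySem.Set.empty).foldl (pvHLStep degrees u) hl)
    (pvZeros num_nodes, pvZeros num_nodes)
  let colors := (PySem.List.pyRange 0 num_nodes 1).foldl (pvColorStepB outer_ring second_ring degrees hl) []
  (colors, degrees.items)

-- ===== PRECONDITION & SPEC =====
-- Pre_ excludes exactly the inputs where some edge endpoint is not a node index 0..len(points)-1:
-- there A (and B alike) raises KeyError on `adj[u].add(v)`.
def Pre_classify_colors (points : List Int) (edges : List (Int × Int)) (outer_ring : List Int) (second_ring : List Int) : Prop :=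
  ∀ p ∈ edges, (0 ≤ p.1 ∧ p.1 < (points.length : Int)) ∧ (0 ≤ p.2 ∧ p.2 < (points.length : Int))
instance (points : List Int) (edges : List (Int × Int)) (outer_ring : List Int) (second_ring : List Int) : Decidable (Pre_classify_colors points edges outer_ring second_ring) := by unfold Pre_classify_colors; infer_instance

def pvWitness_classify_colors : List Int × (List (Int × Int)) × List Int × List Int :=
  ([0, 0, 0, 0], [(0, 1), (1, 2), (0, 2), (2, 3)], [3], [])

def Spec_classify_colors (points : List Int) (edges : List (Int × Int)) (outer_ring : List Int) (second_ring : List Int) (out : List String × (List (Int × Int))) : Prop := out = classify_colors_alt points edges outer_ring second_ring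
instance (points : List Int) (edges : List (Int × Int)) (outer_ring : List Int) (second_ring : List Int) (out : List String × (List (Int × Int))) : Decidable (Spec_classify_colors points edges outer_ring second_ring out) := by unfold Spec_classify_colors; infer_instance

-- ===== CLAIM (what is proved, stated in full; the proofs are below) =====
def Claim_equal_classify_colors : Prop := ∀ (points : List Int) (edges : List (Int × Int)) (outer_ring : List Int) (second_ring : List Int), Dom_classify_colors points edges outer_ring second_ring → Pre_classify_colors points edges outer_ring second_ring → Spec_classify_colors points edges outer_ring second_ring (classify_colors points edges outer_ring second_ring)

-- ===== LEMMAS AND PROOFS =====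

theorem pv_witness_ok : Dom_classify_colors pvWitness_classify_colors.1 pvWitness_classify_colors.2.1 pvWitness_classify_colors.2.2.1 pvWitness_classify_colors.2.2.2 ∧ Pre_classify_colors pvWitness_classify_colors.1 pvWitness_classify_colors.2.1 pvWitness_classify_colors.2.2.1 pvWitness_classify_colors.2.2.2 := by
  constructor <;> decide

-- getD through a fold of key-dependent inserts
theorem pv_getD_foldl_insert_fun {ν : Type} (f : Int → ν) (dflt : ν) :
    ∀ (l : List Int) (d : PySem.Dict Int ν) (k : Int),
    (l.foldl (fun d i => d.insert i (f i)) d).getD k dflt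
      = if k ∈ l then f k else d.getD k dflt
  | [], d, k => by simp
  | x :: t, d, k => by
    simp only [List.foldl_cons, pv_getD_foldl_insert_fun f dflt t, PySem.Dict.getD_insert,
      List.mem_cons]
    by_cases h1 : k ∈ t <;> by_cases h2 : k = x <;> simp [h1, h2]

theorem pv_getD_initAdj (n k : Int) :
    (pvInitAdj n).getD k PySem.Set.empty = PySem.Set.empty := by
  unfold pvInitAdj
  rw [pv_getD_foldl_insert_fun (fun _ => PySem.Set.empty)]
  split <;> simp [PySem.Dict.getD_empty]

theorem pv_getD_zeros (n k : Int) : (pvZeros n).getD k 0 = 0 := by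
  unfold pvZeros
  rw [pv_getD_foldl_insert_fun (fun _ => (0 : Int))]
  split <;> simp [PySem.Dict.getD_empty]

-- invariant of the adjacency construction
def pvGoodAdj (n : Int) (d : PySem.Dict Int (PySem.Set Int)) : Prop :=
  (∀ i j, j ∈ d.getD i PySem.Set.empty → (0 ≤ j ∧ j < n))
  ∧ (∀ i, (d.getD i PySem.Set.empty).Nodup)
  ∧ (∀ i j, j ∈ d.getD i PySem.Set.empty ↔ i ∈ d.getD j PySem.Set.empty)

theorem pv_adjStep_getD (d : PySem.Dict Int (PySem.Set Int)) (u v k : Int) :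
    (pvAdjStep d (u, v)).getD k PySem.Set.empty
      = if k = v then
          PySem.Set.add (if v = u then PySem.Set.add (d.getD u PySem.Set.empty) v else d.getD v PySem.Set.empty) u
        else if k = u then PySem.Set.add (d.getD u PySem.Set.empty) v
        else d.getD k PySem.Set.empty := by
  simp [pvAdjStep, PySem.Dict.getD_insert]

theorem pv_adjStep_mem (d : PySem.Dict Int (PySem.Set Int)) (u v k j : Int) :
    j ∈ (pvAdjStep d (u, v)).getD k PySem.Set.empty
      ↔ j ∈ d.getD k PySem.Set.empty ∨ (k = u ∧ j = v) ∨ (k = v ∧ j = u) := by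
  rw [pv_adjStep_getD]
  by_cases h1 : k = v <;> by_cases h2 : k = u <;> by_cases h3 : v = u <;>
    simp_all [PySem.Set.mem_add] <;> tauto

theorem pvGoodAdj_step (n u v : Int) (d : PySem.Dict Int (PySem.Set Int))
    (hu : 0 ≤ u ∧ u < n) (hv : 0 ≤ v ∧ v < n) (hd : pvGoodAdj n d) :
    pvGoodAdj n (pvAdjStep d (u, v)) := by
  obtain ⟨hb, hn, hs⟩ := hd
  refine ⟨?_, ?_, ?_⟩
  · intro i j hj
    rw [pv_adjStep_mem] at hj
    rcases hj with h | ⟨_, rfl⟩ | ⟨_, rfl⟩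
    · exact hb i j h
    · exact hv
    · exact hu
  · intro i
    rw [pv_adjStep_getD]
    split
    · split
      · exact PySem.Set.nodup_add _ _ (PySem.Set.nodup_add _ _ (hn u))
      · exact PySem.Set.nodup_add _ _ (hn v)
    · split
      · exact PySem.Set.nodup_add _ _ (hn u)
      · exact hn _
  · intro i j
    rw [pv_adjStep_mem, pv_adjStep_mem, hs i j]
    tauto

theorem pvGoodAdj_foldl (n : Int) :
    ∀ (es : List (Int × Int)) (d : PySem.Dict Int (PySem.Set Int)),
    (∀ p ∈ es, (0 ≤ p.1 ∧ p.1 < n) ∧ (0 ≤ p.2 ∧ p.2 < n)) → pvGoodAdj n d →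
    pvGoodAdj n (es.foldl pvAdjStep d)
  | [], d, _, hd => hd
  | p :: t, d, he, hd => by
    simp only [List.foldl_cons]
    exact pvGoodAdj_foldl n t _ (fun q hq => he q (List.mem_cons_of_mem _ hq))
      (pvGoodAdj_step n p.1 p.2 d (he p (List.mem_cons_self)).1 (he p (List.mem_cons_self)).2 hd)

theorem pv_buildAdj_good (n : Int) (edges : List (Int × Int))
    (hE : ∀ p ∈ edges, (0 ≤ p.1 ∧ p.1 < n) ∧ (0 ≤ p.2 ∧ p.2 < n)) :
    pvGoodAdj n (pvBuildAdj n edges) := by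
  unfold pvBuildAdj
  refine pvGoodAdj_foldl n edges _ hE ?_
  have h0 : ∀ k, (pvInitAdj n).getD k PySem.Set.empty = PySem.Set.empty := pv_getD_initAdj n
  refine ⟨?_, ?_, ?_⟩
  · intro i j hj
    rw [h0] at hj
    simp [PySem.Set.empty] at hj
  · intro i
    rw [h0]
    simp [PySem.Set.empty]
  · intro i j
    rw [h0 i, h0 j]
    simp [PySem.Set.empty]

-- the per-pair increment of B's counter dicts, parameterized by the comparison R
def pvGen (R : Int → Int → Bool) (i u v : Int) : Int :=
  if u < v then
    if R u v then (if i = u then 1 else 0)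
    else if R v u then (if i = v then 1 else 0)
    else 0
  else 0

theorem pvHLStep_getD (degrees : PySem.Dict Int Int) (u v i : Int)
    (hl : PySem.Dict Int Int × PySem.Dict Int Int) :
    (pvHLStep degrees u hl v).1.getD i 0
      = hl.1.getD i 0 + pvGen (fun a b => decide (degrees.getD a 0 < degrees.getD b 0)) i u v
    ∧ (pvHLStep degrees u hl v).2.getD i 0
      = hl.2.getD i 0 + pvGen (fun a b => decide (degrees.getD b 0 < degrees.getD a 0)) i u v := by
  unfold pvHLStep pvGen
  constructor <;> split_ifs <;> (try simp only [PySem.Dict.getD_insert]) <;> (try split_ifs) <;>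
    (try simp_all) <;> omega

theorem pvHL_foldl_inner (degrees : PySem.Dict Int Int) (u i : Int) :
    ∀ (l : List Int) (hl : PySem.Dict Int Int × PySem.Dict Int Int),
    (l.foldl (pvHLStep degrees u) hl).1.getD i 0
      = hl.1.getD i 0 + (l.map (pvGen (fun a b => decide (degrees.getD a 0 < degrees.getD b 0)) i u)).sum
    ∧ (l.foldl (pvHLStep degrees u) hl).2.getD i 0
      = hl.2.getD i 0 + (l.map (pvGen (fun a b => decide (degrees.getD b 0 < degrees.getD a 0)) i u)).sum
  | [], hl => by simp
  | v :: t, hl => by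
    simp only [List.foldl_cons, List.map_cons, List.sum_cons,
      pvHL_foldl_inner degrees u i t (pvHLStep degrees u hl v),
      (pvHLStep_getD degrees u v i hl).1, (pvHLStep_getD degrees u v i hl).2]
    omega

theorem pvHL_foldl_outer (degrees : PySem.Dict Int Int) (adj : PySem.Dict Int (PySem.Set Int)) (i : Int) :
    ∀ (us : List Int) (hl : PySem.Dict Int Int × PySem.Dict Int Int),
    (us.foldl (fun hl u => (adj.getD u PySem.Set.empty).foldl (pvHLStep degrees u) hl) hl).1.getD i 0
      = hl.1.getD i 0 + (us.map (fun u => ((adj.getD u PySem.Set.empty).map (pvGen (fun a b => decide (degrees.getD a 0 < degrees.getD b 0)) i u)).sum)).sum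
    ∧ (us.foldl (fun hl u => (adj.getD u PySem.Set.empty).foldl (pvHLStep degrees u) hl) hl).2.getD i 0
      = hl.2.getD i 0 + (us.map (fun u => ((adj.getD u PySem.Set.empty).map (pvGen (fun a b => decide (degrees.getD b 0 < degrees.getD a 0)) i u)).sum)).sum
  | [], hl => by simp
  | u :: t, hl => by
    simp only [List.foldl_cons, List.map_cons, List.sum_cons,
      pvHL_foldl_outer degrees adj i t _,
      (pvHL_foldl_inner degrees u i (adj.getD u PySem.Set.empty) hl).1,
      (pvHL_foldl_inner degrees u i (adj.getD u PySem.Set.empty) hl).2]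
    omega

-- pvGen at u = i / u ≠ i
theorem pvGen_self (R : Int → Int → Bool) (i v : Int) :
    pvGen R i i v = if decide (i < v) && R i v then 1 else 0 := by
  unfold pvGen
  split_ifs <;> simp_all <;> omega

theorem pvGen_ne (R : Int → Int → Bool) (hasym : ∀ a b, R a b = true → R b a = false)
    (i u v : Int) (h : u ≠ i) :
    pvGen R i u v = if decide (v = i) && (decide (u < i) && R i u) then 1 else 0 := by
  unfold pvGen
  split_ifs with h1 h2 h3 h4 h5 h6 h7 <;> simp_all <;> try omega
  all_goals (subst_vars; simp_all [hasym])

-- 0/1 sums are countP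
theorem pv_sum_ite01 (p : Int → Bool) :
    ∀ (l : List Int), (l.map (fun v => if p v then (1 : Int) else 0)).sum = (l.countP p : Int)
  | [] => by simp
  | v :: t => by
    simp only [List.map_cons, List.sum_cons, pv_sum_ite01 p t, List.countP_cons]
    by_cases h : p v <;> simp [h] <;> omega

theorem pv_sum_single (c : Int) (i : Int) :
    ∀ (l : List Int), l.Nodup → i ∈ l → (l.map (fun u => if u = i then c else 0)).sum = c
  | [], _, hm => by simp at hm
  | x :: t, hn, hm => by
    simp only [List.map_cons, List.sum_cons]
    rcases List.mem_cons.mp hm with rfl | hm'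
    · have : ∀ u ∈ t, (if u = i then c else 0) = 0 := by
        intro u hu
        have : u ≠ i := fun h => (List.nodup_cons.mp hn).1 (h ▸ hu)
        simp [this]
      rw [List.map_congr_left this]
      simp
    · have hxi : x ≠ i := fun h => (List.nodup_cons.mp hn).1 (h ▸ hm')
      rw [pv_sum_single c i t (List.nodup_cons.mp hn).2 hm']
      simp [hxi]

-- a constant conjunct factors out of countP
theorem pv_countP_const (b : Bool) (i : Int) (l : List Int) :
    l.countP (fun v => decide (v = i) && b)
      = if b then l.countP (fun v => decide (v = i)) else 0 := by
  cases b <;> simp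

-- counting one element of a nodup list
theorem pv_countP_mem (i : Int) :
    ∀ (l : List Int), l.Nodup → l.countP (fun v => decide (v = i)) = if i ∈ l then 1 else 0
  | [], _ => by simp
  | x :: t, hn => by
    have ih := pv_countP_mem i t (List.nodup_cons.mp hn).2
    by_cases hx : x = i
    · subst hx
      have hni : x ∉ t := (List.nodup_cons.mp hn).1
      simp [List.countP_cons, ih, hni]
    · have hix : ¬ i = x := fun h => hx h.symm
      simp only [List.countP_cons, ih, List.mem_cons]
      simp [hx, hix]

-- counting members of a nodup sublist inside a nodup superlist
theorem pv_countP_sub (rng l : List Int) (hr : rng.Nodup) (hl : l.Nodup)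
    (hsub : ∀ x ∈ l, x ∈ rng) (q : Int → Bool) :
    rng.countP (fun u => decide (u ∈ l) && q u) = l.countP q := by
  rw [List.countP_eq_length_filter, List.countP_eq_length_filter]
  have hperm : (rng.filter (fun u => decide (u ∈ l) && q u)).Perm (l.filter q) := by
    rw [List.perm_ext_iff_of_nodup (hr.filter _) (hl.filter _)]
    intro a
    simp only [List.mem_filter, decide_eq_true_eq, Bool.and_eq_true]
    constructor
    · rintro ⟨_, ha, hq⟩; exact ⟨ha, hq⟩
    · rintro ⟨ha, hq⟩; exact ⟨hsub a ha, ha, hq⟩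
  exact hperm.length_eq

-- splitting a count over a trichotomy
theorem pv_countP_tri (i : Int) (Q : Int → Bool) (hQ : Q i = false) :
    ∀ (l : List Int),
    l.countP (fun v => decide (i < v) && Q v) + l.countP (fun v => decide (v < i) && Q v)
      = l.countP Q
  | [] => by simp
  | v :: t => by
    have ih := pv_countP_tri i Q hQ t
    simp only [List.countP_cons]
    rcases lt_trichotomy i v with h | h | h
    · have d1 : decide (i < v) = true := by simp [h]
      have d2 : decide (v < i) = false := by simp; omega
      cases hq : Q v <;> simp [d1, d2, hq] <;> omega
    · subst h
      simp [hQ, ih]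
    · have d1 : decide (i < v) = false := by simp; omega
      have d2 : decide (v < i) = true := by simp [h]
      cases hq : Q v <;> simp [d1, d2, hq] <;> omega

-- the heart: the edge-pass total at node i equals A's per-node neighbor count
theorem pv_main_count (n : Int) (A : Int → PySem.Set Int) (R : Int → Int → Bool)
    (hasym : ∀ a b, R a b = true → R b a = false)
    (hnodup : ∀ u, (A u).Nodup)
    (hsym : ∀ u j, j ∈ A u ↔ u ∈ A j)
    (hbnd : ∀ u j, j ∈ A u → (0 ≤ j ∧ j < n))
    (i : Int) (hi : 0 ≤ i ∧ i < n) :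
    ((PySem.List.pyRange 0 n 1).map (fun u => ((A u).map (pvGen R i u)).sum)).sum
      = ((A i).countP (fun j => R i j) : Int) := by
  have hRii : R i i = false := by
    by_cases h : R i i = true
    · exact hasym i i h
    · simpa using h
  have hpt : ∀ u ∈ PySem.List.pyRange 0 n 1,
      ((A u).map (pvGen R i u)).sum
        = (if u = i then ((A i).countP (fun v => decide (i < v) && R i v) : Int) else 0)
          + (if decide (u ∈ A i) && (decide (u < i) && R i u) then (1 : Int) else 0) := by
    intro u _
    by_cases hu : u = i
    · subst hu
      have h1 : ∀ v ∈ A u, pvGen R u u v = if decide (u < v) && R u v then (1 : Int) else 0 :=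
        fun v _ => pvGen_self R u v
      rw [List.map_congr_left h1, pv_sum_ite01]
      have : (decide (u ∈ A u) && (decide (u < u) && R u u)) = false := by
        simp
      simp [this]
    · have h1 : ∀ v ∈ A u, pvGen R i u v
          = if decide (v = i) && (decide (u < i) && R i u) then (1 : Int) else 0 :=
        fun v _ => pvGen_ne R hasym i u v hu
      rw [List.map_congr_left h1, pv_sum_ite01, pv_countP_const,
        pv_countP_mem i (A u) (hnodup u)]
      have hmi : i ∈ A u ↔ u ∈ A i := hsym u i
      by_cases h2 : u < i <;> by_cases h3 : R i u <;> by_cases h4 : u ∈ A i <;>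
        simp_all
  rw [List.map_congr_left hpt]
  have hsplit :
      ((PySem.List.pyRange 0 n 1).map (fun u =>
        (if u = i then ((A i).countP (fun v => decide (i < v) && R i v) : Int) else 0)
          + (if decide (u ∈ A i) && (decide (u < i) && R i u) then (1 : Int) else 0))).sum
      = ((PySem.List.pyRange 0 n 1).map (fun u =>
          if u = i then ((A i).countP (fun v => decide (i < v) && R i v) : Int) else 0)).sum
        + ((PySem.List.pyRange 0 n 1).map (fun u =>
            if decide (u ∈ A i) && (decide (u < i) && R i u) then (1 : Int) else 0)).sum := by
    rw [← List.sum_map_add]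
  rw [hsplit]
  have hmem : i ∈ PySem.List.pyRange 0 n 1 := by
    rw [PySem.List.mem_pyRange_one]; exact hi
  rw [pv_sum_single _ _ _ (PySem.List.nodup_pyRange_one 0 n) hmem]
  rw [pv_sum_ite01]
  rw [pv_countP_sub (PySem.List.pyRange 0 n 1) (A i) (PySem.List.nodup_pyRange_one 0 n)
    (hnodup i) (fun x hx => by rw [PySem.List.mem_pyRange_one]; exact hbnd i x hx)
    (fun u => decide (u < i) && R i u)]
  have := pv_countP_tri i (fun v => R i v) hRii (A i)
  push_cast [← this]
  ring

-- the single-node color functions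
def pvColorA (outer_ring second_ring : List Int) (adj : PySem.Dict Int (PySem.Set Int))
    (degrees : PySem.Dict Int Int) (i : Int) : String :=
  if outer_ring.contains i || second_ring.contains i then "gray"
  else if degrees.getD i 0 == 0 then "red"
  else
    let higher : Int := ((adj.getD i PySem.Set.empty).countP (fun j => decide (degrees.getD i 0 < degrees.getD j 0)) : Int)
    let lower : Int := ((adj.getD i PySem.Set.empty).countP (fun j => decide (degrees.getD j 0 < degrees.getD i 0)) : Int)
    if higher > lower then "red"
    else if lower > higher then "green"
    else "yellow"

theorem pv_colorStepA_eq (outer_ring second_ring : List Int) (adj : PySem.Dict Int (PySem.Set Int))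
    (degrees : PySem.Dict Int Int) (cs : List String) (i : Int) :
    pvColorStepA outer_ring second_ring adj degrees cs i
      = cs ++ [pvColorA outer_ring second_ring adj degrees i] := by
  simp only [pvColorStepA, pvColorA, PySem.List.foldl_ite_add_one, zero_add, gt_iff_lt]
  split_ifs <;> rfl

theorem pv_colorStepB_eq (outer_ring second_ring : List Int) (degrees : PySem.Dict Int Int)
    (hl : PySem.Dict Int Int × PySem.Dict Int Int) (cs : List String) (i : Int) :
    pvColorStepB outer_ring second_ring degrees hl cs i
      = cs ++ [if outer_ring.contains i || second_ring.contains i then "gray"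
               else if degrees.getD i 0 == 0 then "red"
               else if hl.1.getD i 0 > hl.2.getD i 0 then "red"
               else if hl.2.getD i 0 > hl.1.getD i 0 then "green"
               else "yellow"] := by
  unfold pvColorStepB
  split_ifs <;> rfl

-- ===== VERDICT (by name: the statement is the Claim_ definition above) =====
theorem classify_colors_spec : Claim_equal_classify_colors := by
  intro points edges outer_ring second_ring _ hPre
  unfold Spec_classify_colors classify_colors classify_colors_alt
  set n : Int := (points.length : Int) with hn
  set adj := pvBuildAdj n edges with hadj
  set degrees := pvDegrees n adj with hdeg
  have hgood : pvGoodAdj n adj := pv_buildAdj_good n edges hPre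
  obtain ⟨hbnd, hnodup, hsym⟩ := hgood
  set hl := (PySem.List.pyRange 0 n 1).foldl
    (fun hl u => (adj.getD u PySem.Set.empty).foldl (pvHLStep degrees u) hl)
    (pvZeros n, pvZeros n) with hhl
  refine Prod.ext ?_ rfl
  -- colors lists
  show (PySem.List.pyRange 0 n 1).foldl (pvColorStepA outer_ring second_ring adj degrees) []
      = (PySem.List.pyRange 0 n 1).foldl (pvColorStepB outer_ring second_ring degrees hl) []
  rw [PySem.List.foldl_congr_mem (g := fun cs i => cs ++ [pvColorA outer_ring second_ring adj degrees i])
        (h := fun cs i _ => pv_colorStepA_eq outer_ring second_ring adj degrees cs i),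
      PySem.List.foldl_congr_mem (g := fun cs i => cs ++
          [if outer_ring.contains i || second_ring.contains i then "gray"
           else if degrees.getD i 0 == 0 then "red"
           else if hl.1.getD i 0 > hl.2.getD i 0 then "red"
           else if hl.2.getD i 0 > hl.1.getD i 0 then "green"
           else "yellow"])
        (h := fun cs i _ => pv_colorStepB_eq outer_ring second_ring degrees hl cs i),
      PySem.List.foldl_append_singleton_eq_map, PySem.List.foldl_append_singleton_eq_map]
  simp only [List.nil_append]
  apply List.map_congr_left
  intro i hi
  have hiB : 0 ≤ i ∧ i < n := (PySem.List.mem_pyRange_one).mp hi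
  -- B's counters at i equal A's per-node counts
  have hH : hl.1.getD i 0 = ((adj.getD i PySem.Set.empty).countP (fun j => decide (degrees.getD i 0 < degrees.getD j 0)) : Int) := by
    rw [hhl, (pvHL_foldl_outer degrees adj i (PySem.List.pyRange 0 n 1) (pvZeros n, pvZeros n)).1]
    simp only [pv_getD_zeros, zero_add]
    exact pv_main_count n (fun u => adj.getD u PySem.Set.empty)
      (fun a b => decide (degrees.getD a 0 < degrees.getD b 0))
      (fun a b h => by simp_all; omega) hnodup hsym (fun u j h => hbnd u j h) i hiB
  have hL : hl.2.getD i 0 = ((adj.getD i PySem.Set.empty).countP (fun j => decide (degrees.getD j 0 < degrees.getD i 0)) : Int) := by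
    rw [hhl, (pvHL_foldl_outer degrees adj i (PySem.List.pyRange 0 n 1) (pvZeros n, pvZeros n)).2]
    simp only [pv_getD_zeros, zero_add]
    exact pv_main_count n (fun u => adj.getD u PySem.Set.empty)
      (fun a b => decide (degrees.getD b 0 < degrees.getD a 0))
      (fun a b h => by simp_all; omega) hnodup hsym (fun u j h => hbnd u j h) i hiB
  unfold pvColorA
  rw [hH, hL]
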